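-- pv_equiv track=rewrite | github.com/AbdullahIbra1/Plagiarism-Detection | main3.py | divide_into_intervals
-- ===== SOURCE A (Python) =====
-- def divide_into_intervals(number, intervals):
--     interval_size = number // intervals
--     remaining = number % intervals
--
--     result = []
--     start = 0
--     for i in range(intervals):
--         end = start + interval_size + (1 if i < remaining else 0)
--         result.append((start, end))
--         start = end
--
--     return result
-- ===== SOURCE B (Python) =====
-- def divide_into_intervals(number, intervals):
--     q = number // intervals
--     r = number % intervals
--     return [(i * q + min(i, r), (i + 1) * q + min(i + 1, r))
--             for i in range(intervals)]
-- ===== Notes on version B (the rewrite author's own statement) =====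
-- stated objective: alternative
-- what changed: Replaced the loop that threads a running `start` accumulator across iterations with a comprehension computing each interval's endpoints directly from its index i via the closed form i*q + min(i, r).
import Mathlib
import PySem

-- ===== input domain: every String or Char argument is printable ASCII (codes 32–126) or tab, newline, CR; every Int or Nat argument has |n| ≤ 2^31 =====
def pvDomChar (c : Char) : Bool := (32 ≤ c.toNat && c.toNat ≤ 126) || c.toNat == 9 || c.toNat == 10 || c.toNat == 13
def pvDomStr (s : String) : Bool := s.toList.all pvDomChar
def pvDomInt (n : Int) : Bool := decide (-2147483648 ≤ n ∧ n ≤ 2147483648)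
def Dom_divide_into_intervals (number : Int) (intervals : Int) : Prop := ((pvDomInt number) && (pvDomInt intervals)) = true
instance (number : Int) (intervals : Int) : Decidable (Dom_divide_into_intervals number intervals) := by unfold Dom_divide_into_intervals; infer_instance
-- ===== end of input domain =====

-- B replaces the carried `start` accumulator with a per-index closed form i*q + min(i, r); alternative decomposition, same cost.


-- ===== PORT A =====
def divide_into_intervals (number : Int) (intervals : Int) : List (Int × Int) :=
  let interval_size := PySem.Int.floordiv number intervals
  let remaining := PySem.Int.mod number intervals
  let st := (PySem.List.pyRange 0 intervals 1).foldl
    (fun (s : List (Int × Int) × Int) i =>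
      let e := s.2 + interval_size + (if i < remaining then 1 else 0)
      (s.1 ++ [(s.2, e)], e))
    ([], 0)
  st.1

-- ===== PORT B =====
def divide_into_intervals_alt (number : Int) (intervals : Int) : List (Int × Int) :=
  let q := PySem.Int.floordiv number intervals
  let r := PySem.Int.mod number intervals
  (PySem.List.pyRange 0 intervals 1).map
    (fun i => (i * q + min i r, (i + 1) * q + min (i + 1) r))

-- ===== PRECONDITION & SPEC =====
-- Pre_ excludes exactly intervals = 0, where Python A raises ZeroDivisionError.
def Pre_divide_into_intervals (_number : Int) (intervals : Int) : Prop := intervals ≠ 0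
instance (number : Int) (intervals : Int) : Decidable (Pre_divide_into_intervals number intervals) := by unfold Pre_divide_into_intervals; infer_instance
def pvWitness_divide_into_intervals : Int × Int := (7, 3)

def Spec_divide_into_intervals (number : Int) (intervals : Int) (out : List (Int × Int)) : Prop := out = divide_into_intervals_alt number intervals
instance (number : Int) (intervals : Int) (out : List (Int × Int)) : Decidable (Spec_divide_into_intervals number intervals out) := by unfold Spec_divide_into_intervals; infer_instance

-- ===== CLAIM (what is proved, stated in full; the proofs are below) =====
def Claim_equal_divide_into_intervals : Prop := ∀ (number : Int) (intervals : Int), Dom_divide_into_intervals number intervals → Pre_divide_into_intervals number intervals → Spec_divide_into_intervals number intervals (divide_into_intervals number intervals)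

-- ===== LEMMAS AND PROOFS =====

-- Loop invariant: after n iterations the accumulator is (the first n closed-form
-- pairs, the closed-form start n*q + min n r), provided the remainder r is ≥ 0.
theorem pv_fold_invariant (q r : Int) (hr : 0 ≤ r) (n : ℕ) :
    (PySem.List.pyRange 0 (n : Int) 1).foldl
      (fun (s : List (Int × Int) × Int) i =>
        let e := s.2 + q + (if i < r then 1 else 0)
        (s.1 ++ [(s.2, e)], e))
      ([], 0)
    = ((PySem.List.pyRange 0 (n : Int) 1).map
        (fun i => (i * q + min i r, (i + 1) * q + min (i + 1) r)),
       (n : Int) * q + min (n : Int) r) := by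
  induction n with
  | zero => simp; omega
  | succ n ih =>
    have hcast : ((n + 1 : ℕ) : Int) = (n : Int) + 1 := by push_cast; ring
    rw [hcast, PySem.List.pyRange_one_succ_right (by positivity)]
    rw [List.foldl_append, List.map_append, ih]
    simp only [List.foldl_cons, List.foldl_nil]
    have hmin : min (n : Int) r + (if (n : Int) < r then 1 else 0) = min ((n : Int) + 1) r := by
      split_ifs with h <;> omega
    have hq : ((n : Int) + 1) * q = (n : Int) * q + q := by ring
    simp only [List.map_cons, List.map_nil, Prod.mk.injEq]
    refine ⟨?_, by omega⟩
    congr 1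
    simp only [List.cons.injEq, and_true, Prod.mk.injEq]
    exact ⟨trivial, by omega⟩

-- ===== VERDICT (by name: the statement is the Claim_ definition above) =====
theorem divide_into_intervals_spec : Claim_equal_divide_into_intervals := by
  intro number intervals _ hp
  unfold Spec_divide_into_intervals divide_into_intervals divide_into_intervals_alt
  rcases lt_trichotomy intervals 0 with h | h | h
  · rw [PySem.List.pyRange_one_eq_nil (by omega)]; simp
  · exact absurd h hp
  · have hr : 0 ≤ PySem.Int.mod number intervals := PySem.Int.mod_nonneg number h
    have hn : intervals = ((intervals.toNat : ℕ) : Int) := by omega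
    rw [hn]
    exact congrArg Prod.fst (pv_fold_invariant (PySem.Int.floordiv number ((intervals.toNat : ℕ) : Int))
      (PySem.Int.mod number ((intervals.toNat : ℕ) : Int)) (hn ▸ hr) intervals.toNat)
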